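-- pv_equiv track=rewrite | github.com/emilioantonio-perezocampo/legal-scraper | src/gui/infrastructure/cas_chunk_benchmark.py | _pick_decision_section
-- ===== SOURCE A (Python) =====
-- from typing import Any, Callable, Iterable, Iterator, Sequence
--
-- def _pick_decision_section(sections: Sequence[dict[str, Any]]) -> dict[str, Any] | None:
--     for section in reversed(sections):
--         label = (section.get("label") or "").strip()
--         text = (section.get("text") or "").strip()
--         if any(term in label.lower() for term in ("decision", "award", "ruling", "dispositivo", "dispositif")):
--             return section
--         if any(term in text.lower() for term in ("upheld", "dismissed", "ordered to pay", "appeal")) and len(text) > 120: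
--             return section
--     return sections[-1] if sections else None
-- ===== SOURCE B (Python) =====
-- _LABEL_TERMS = ("decision", "award", "ruling", "dispositivo", "dispositif")
-- _TEXT_TERMS = ("upheld", "dismissed", "ordered to pay", "appeal")
--
--
-- def _matches(section):
--     label = (section.get("label") or "").strip().lower()
--     text = (section.get("text") or "").strip()
--     return any(t in label for t in _LABEL_TERMS) or (
--         len(text) > 120 and any(t in text.lower() for t in _TEXT_TERMS)
--     )
--
--
-- def _pick_decision_section(sections):
--     chosen = sections[-1] if sections else None
--     for section in sections:
--         if _matches(section):
--             chosen = section
--     return chosen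
-- ===== Notes on version B (the rewrite author's own statement) =====
-- stated objective: simpler
-- what changed: Replaces A's reverse scan with early exit (and separate fallback at the end) by one forward fold over an accumulator initialised to the fallback (last section or None) and overwritten on every match, with the two keyword tests merged into one boolean predicate.
import Mathlib
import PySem

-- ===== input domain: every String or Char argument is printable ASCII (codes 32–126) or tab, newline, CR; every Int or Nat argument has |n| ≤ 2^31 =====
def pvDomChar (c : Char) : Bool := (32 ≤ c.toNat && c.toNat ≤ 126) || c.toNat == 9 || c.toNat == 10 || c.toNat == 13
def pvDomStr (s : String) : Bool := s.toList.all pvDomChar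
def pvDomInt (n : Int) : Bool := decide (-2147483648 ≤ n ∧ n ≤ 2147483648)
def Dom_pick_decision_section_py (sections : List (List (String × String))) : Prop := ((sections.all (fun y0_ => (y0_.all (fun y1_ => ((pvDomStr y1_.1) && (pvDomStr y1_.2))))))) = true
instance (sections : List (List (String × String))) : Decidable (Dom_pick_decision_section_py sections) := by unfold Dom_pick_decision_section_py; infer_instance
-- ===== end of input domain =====

-- B replaces A's reverse scan with early exit by a forward fold over an accumulator
-- initialised to the fallback and overwritten on each match; objective: simpler decomposition.

-- ===== PORT A =====
-- the reverse for-loop of A: returns at the first section (of the reversed list) passing either keyword test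
def pickDecisionLoopA : List (List (String × String)) → Option (List (String × String))
  | [] => none
  | sec :: rest =>
    let label := PySem.Str.strip ((PySem.Dict.mk sec).getD "label" "")
    let text := PySem.Str.strip ((PySem.Dict.mk sec).getD "text" "")
    if (["decision", "award", "ruling", "dispositivo", "dispositif"].any
          (fun term => PySem.Str.isIn term (PySem.Str.lower label))) = true then
      some sec
    else if (["upheld", "dismissed", "ordered to pay", "appeal"].any
          (fun term => PySem.Str.isIn term (PySem.Str.lower text))) = true ∧ 120 < PySem.Str.len text then
      some sec
    else pickDecisionLoopA rest

def pick_decision_section_py (sections : List (List (String × String))) : Option (List (String × String)) :=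
  match pickDecisionLoopA sections.reverse with
  | some sec => some sec
  | none => if sections.isEmpty then none else PySem.List.pyGet? sections (-1)

-- ===== PORT B =====
-- module constants of Source B
def pvLabelTerms : List String := ["decision", "award", "ruling", "dispositivo", "dispositif"]
def pvTextTerms : List String := ["upheld", "dismissed", "ordered to pay", "appeal"]

-- helper _matches of Source B: one merged boolean predicate
def pvMatches (sec : List (String × String)) : Bool :=
  let label := PySem.Str.lower (PySem.Str.strip ((PySem.Dict.mk sec).getD "label" ""))
  let text := PySem.Str.strip ((PySem.Dict.mk sec).getD "text" "")
  pvLabelTerms.any (fun t => PySem.Str.isIn t label) ||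
    (decide (120 < PySem.Str.len text) &&
      pvTextTerms.any (fun t => PySem.Str.isIn t (PySem.Str.lower text)))

def pick_decision_section_py_alt (sections : List (List (String × String))) : Option (List (String × String)) :=
  sections.foldl (fun chosen sec => if pvMatches sec then some sec else chosen)
    (if sections.isEmpty then none else PySem.List.pyGet? sections (-1))

-- ===== PRECONDITION & SPEC =====
def Spec_pick_decision_section_py (sections : List (List (String × String))) (out : Option (List (String × String))) : Prop := out = pick_decision_section_py_alt sections
instance (sections : List (List (String × String))) (out : Option (List (String × String))) : Decidable (Spec_pick_decision_section_py sections out) := by unfold Spec_pick_decision_section_py; infer_instance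

-- ===== CLAIM (what is proved, stated in full; the proofs are below) =====
def Claim_equal_pick_decision_section_py : Prop := ∀ (sections : List (List (String × String))), Dom_pick_decision_section_py sections → Spec_pick_decision_section_py sections (pick_decision_section_py sections)

-- ===== LEMMAS AND PROOFS =====

-- A's loop is the first match (over the list it is given) of B's merged predicate
theorem pickDecisionLoopA_eq_find? (l : List (List (String × String))) :
    pickDecisionLoopA l = l.find? pvMatches := by
  induction l with
  | nil => rfl
  | cons s rest ih =>
    simp only [pickDecisionLoopA, List.find?, pvMatches, pvLabelTerms, pvTextTerms]
    generalize (["decision", "award", "ruling", "dispositivo", "dispositif"].any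
        (fun term => PySem.Str.isIn term (PySem.Str.lower (PySem.Str.strip ((PySem.Dict.mk s).getD "label" ""))))) = c1
    generalize (["upheld", "dismissed", "ordered to pay", "appeal"].any
        (fun term => PySem.Str.isIn term (PySem.Str.lower (PySem.Str.strip ((PySem.Dict.mk s).getD "text" ""))))) = c2
    generalize PySem.Str.len (PySem.Str.strip ((PySem.Dict.mk s).getD "text" "")) = L
    cases c1 <;> cases c2 <;> by_cases hL : (120:Int) < L <;> simp [hL, ih]

-- B's overwrite-fold computes the last match, falling back to its initial accumulator
theorem foldl_overwrite_eq_or_find?_reverse {α : Type} (p : α → Bool) (l : List α) (init : Option α) :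
    l.foldl (fun chosen sec => if p sec then some sec else chosen) init
      = (l.reverse.find? p).or init := by
  induction l generalizing init with
  | nil => rfl
  | cons a l ih =>
    rw [List.foldl_cons, ih, List.reverse_cons, List.find?_append]
    cases h : l.reverse.find? p <;> by_cases hp : p a = true <;> simp [hp, Option.or]

-- ===== VERDICT (by name: the statement is the Claim_ definition above) =====
theorem pick_decision_section_py_spec : Claim_equal_pick_decision_section_py := by
  intro sections _
  unfold Spec_pick_decision_section_py pick_decision_section_py pick_decision_section_py_alt
  rw [pickDecisionLoopA_eq_find?, foldl_overwrite_eq_or_find?_reverse]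
  cases sections.reverse.find? pvMatches <;> simp [Option.or]
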